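-- pv_equiv track=rewrite | github.com/nixin72/CC-COMP-352 | assignments/a2_40082638/Question2.py | myImplementation2
-- ===== SOURCE A (Python) =====
-- def myImplementation2(A):
--     Res = 0
--     n = len(A)
--     B = [0] * n
--
--     for q in range(0, n):
--         for k in range(0, n):
--             if A[q] > A[k]:
--                 Res += 1
--
--         B[Res] = A[q]
--         Res = 0
--
--     return B
-- ===== SOURCE B (Python) =====
-- def myImplementation2(A):
--     # Sort once, then read each element's rank (= count of strictly smaller
--     # elements) as the first index of its value in the sorted list.
--     S = sorted(A)
--     rank = {}
--     for i, x in enumerate(S):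
--         if x not in rank:
--             rank[x] = i
--     B = [0] * len(A)
--     for x in A:
--         B[rank[x]] = x
--     return B
-- ===== Notes on version B (the rewrite author's own statement) =====
-- stated objective: faster
-- what changed: Replaces the quadratic count-smaller-for-each-element double loop by one sort plus a first-occurrence rank dictionary built in a single pass over the sorted list.
import Mathlib
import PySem

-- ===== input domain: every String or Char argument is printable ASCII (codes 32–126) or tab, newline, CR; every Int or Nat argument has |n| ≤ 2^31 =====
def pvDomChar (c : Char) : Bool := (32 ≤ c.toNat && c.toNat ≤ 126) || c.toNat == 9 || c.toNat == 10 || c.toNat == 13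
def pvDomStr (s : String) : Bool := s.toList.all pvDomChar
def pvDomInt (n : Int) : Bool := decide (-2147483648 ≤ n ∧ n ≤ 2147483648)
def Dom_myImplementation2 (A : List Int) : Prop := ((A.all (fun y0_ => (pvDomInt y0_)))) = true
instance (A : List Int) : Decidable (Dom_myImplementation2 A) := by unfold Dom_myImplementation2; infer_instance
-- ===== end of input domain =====

-- B replaces A's count-smaller-per-element double loop by one sort plus a
-- first-occurrence rank dictionary built in a single pass (objective: faster).

-- ===== PORT A =====
def myImplementation2 (A : List Int) : List Int :=
  let n : Int := (A.length : Int)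
  let B0 : List Int := List.replicate A.length 0
  (PySem.List.pyRange 0 n 1).foldl
    (fun B q =>
      let res : Int := (PySem.List.pyRange 0 n 1).foldl
        (fun r k => if PySem.List.pyGetD A q 0 > PySem.List.pyGetD A k 0 then r + 1 else r) 0
      B.set res.toNat (PySem.List.pyGetD A q 0))
    B0

-- ===== PORT B =====
def myImplementation2_alt (A : List Int) : List Int :=
  let S := PySem.List.sorted A (fun x => x) false
  let rank : PySem.Dict Int Int :=
    (PySem.List.enumerate S 0).foldl
      (fun d p => if ¬ PySem.Dict.contains d p.2 then PySem.Dict.insert d p.2 p.1 else d)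
      PySem.Dict.empty
  -- rank[x] never raises (every x ∈ A is a key of rank); ported as getD with an unused default
  A.foldl (fun B x => B.set (PySem.Dict.getD rank x 0).toNat x) (List.replicate A.length 0)

-- ===== PRECONDITION & SPEC =====
def Spec_myImplementation2 (A : List Int) (out : List Int) : Prop := out = myImplementation2_alt A
instance (A : List Int) (out : List Int) : Decidable (Spec_myImplementation2 A out) := by unfold Spec_myImplementation2; infer_instance

-- ===== CLAIM (what is proved, stated in full; the proofs are below) =====
def Claim_equal_myImplementation2 : Prop := ∀ (A : List Int), Dom_myImplementation2 A → Spec_myImplementation2 A (myImplementation2 A)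

-- ===== LEMMAS AND PROOFS =====

-- B's dictionary-building loop never changes the binding of a key that is already present.
lemma rank_contains (S : List Int) (i0 : Int) (d : PySem.Dict Int Int) (x : Int)
    (h : PySem.Dict.contains d x = true) :
    PySem.Dict.get?
      ((PySem.List.enumerate S i0).foldl
        (fun d p => if ¬ PySem.Dict.contains d p.2 then PySem.Dict.insert d p.2 p.1 else d) d) x
      = PySem.Dict.get? d x := by
  induction S generalizing i0 d with
  | nil => simp [PySem.List.enumerate_nil]
  | cons a S ih =>
    rw [PySem.List.enumerate_cons]
    simp only [List.foldl_cons]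
    by_cases hc : PySem.Dict.contains d a = true
    · rw [if_neg (by simp [hc])]
      exact ih (i0 + 1) d h
    · rw [if_pos (by simp [hc])]
      have hxa : x ≠ a := fun he => hc (he ▸ h)
      rw [ih (i0 + 1) _ (by simp [PySem.Dict.contains_insert, h])]
      exact PySem.Dict.get?_insert_of_ne d i0 hxa

-- Looking up an absent key after the loop yields the start offset plus the index of
-- the key's first occurrence in the enumerated list.
lemma rank_new (S : List Int) (x : Int) (j : Nat) :
    ∀ (i0 : Int) (d : PySem.Dict Int Int),
      PySem.Dict.contains d x = false →
      List.findIdx? (fun y => y == x) S = some j →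
      PySem.Dict.get?
        ((PySem.List.enumerate S i0).foldl
          (fun d p => if ¬ PySem.Dict.contains d p.2 then PySem.Dict.insert d p.2 p.1 else d) d) x
        = some (i0 + (j : Int)) := by
  induction S generalizing j with
  | nil => intro i0 d _ hidx; simp at hidx
  | cons a S ih =>
    intro i0 d hd hidx
    rw [PySem.List.enumerate_cons]
    simp only [List.foldl_cons]
    by_cases hax : a = x
    · subst hax
      rw [List.findIdx?_cons] at hidx
      simp at hidx
      rw [if_pos (by simp [hd])]
      rw [rank_contains S (i0 + 1) _ a (by simp)]
      rw [PySem.Dict.get?_insert_self]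
      simp [← hidx]
    · rw [List.findIdx?_cons, if_neg (by simp [hax])] at hidx
      obtain ⟨j', hj', rfl⟩ := Option.map_eq_some_iff.mp hidx
      have step_nc : ∀ d' : PySem.Dict Int Int,
          PySem.Dict.contains
            (if ¬ PySem.Dict.contains d' ((i0, a) : Int × Int).2
             then PySem.Dict.insert d' ((i0, a) : Int × Int).2 ((i0, a) : Int × Int).1 else d') x
            = PySem.Dict.contains d' x := by
        intro d'
        by_cases hc : PySem.Dict.contains d' a = true
        · simp [hc]
        · simp [hc, PySem.Dict.contains_insert, show x ≠ a from fun h => hax h.symm]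
      rw [ih j' (i0 + 1) _ (by rw [step_nc]; exact hd) hj']
      congr 1
      push_cast
      ring

-- In a ≤-sorted list the first occurrence of a member sits exactly after the
-- strictly smaller elements.
lemma findIdx_sorted (S : List Int) (hp : S.Pairwise (· ≤ ·)) (x : Int) (hx : x ∈ S) :
    List.findIdx? (fun y => y == x) S = some (S.countP (fun y => decide (x > y))) := by
  induction S with
  | nil => cases hx
  | cons a S ih =>
    rw [List.pairwise_cons] at hp
    by_cases hax : a = x
    · subst hax
      have h0 : S.countP (fun y => decide (a > y)) = 0 := by
        rw [List.countP_eq_zero]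
        intro y hy
        simpa using not_lt.mpr (hp.1 y hy)
      rw [List.findIdx?_cons, if_pos (by simp)]
      simp [h0]
    · have hxS : x ∈ S := by
        rcases List.mem_cons.mp hx with h | h
        · exact absurd h.symm hax
        · exact h
      have hax' : a < x := lt_of_le_of_ne (hp.1 x hxS) hax
      rw [List.findIdx?_cons, if_neg (by simp [hax]), ih hp.2 hxS]
      simp [hax']

-- ===== VERDICT (by name: the statement is the Claim_ definition above) =====
theorem myImplementation2_spec : Claim_equal_myImplementation2 := by
  intro A _
  unfold Spec_myImplementation2
  have hA : myImplementation2 A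
      = List.foldl (fun B x => B.set (List.countP (fun y => decide (x > y)) A) x)
          (List.replicate A.length 0) A := by
    show List.foldl
        (fun B q => B.set
          ((List.foldl (fun r k => if PySem.List.pyGetD A q 0 > PySem.List.pyGetD A k 0 then r + 1 else r)
            (0 : Int) (PySem.List.pyRange 0 (A.length : Int) 1))).toNat
          (PySem.List.pyGetD A q 0))
        (List.replicate A.length 0) (PySem.List.pyRange 0 (A.length : Int) 1) = _
    have hcnt : ∀ x : Int,
        List.foldl (fun r k => if x > PySem.List.pyGetD A k 0 then r + 1 else r)
          (0 : Int) (PySem.List.pyRange 0 (A.length : Int) 1)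
        = (A.countP (fun y => decide (x > y)) : Int) := by
      intro x
      refine Eq.trans (PySem.List.foldl_pyRange_zero_pyGetD' A 0
        (fun r y => if x > y then r + 1 else r) 0) ?_
      refine Eq.trans (PySem.List.foldl_ite_add_one (fun y => x > y) A 0) ?_
      simp
    refine Eq.trans (PySem.List.foldl_pyRange_zero_pyGetD' A 0
        (fun B x => B.set
          ((List.foldl (fun r k => if x > PySem.List.pyGetD A k 0 then r + 1 else r)
            (0 : Int) (PySem.List.pyRange 0 (A.length : Int) 1))).toNat x)
        (List.replicate A.length 0)) ?_
    apply PySem.List.foldl_congr_mem'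
    intro x _ B
    rw [hcnt x]
    simp
  have hB : myImplementation2_alt A
      = List.foldl (fun B x => B.set (List.countP (fun y => decide (x > y)) A) x)
          (List.replicate A.length 0) A := by
    show List.foldl
        (fun B x => B.set
          (PySem.Dict.getD
            ((PySem.List.enumerate (PySem.List.sorted A (fun x => x) false) 0).foldl
              (fun (d : PySem.Dict Int Int) (p : Int × Int) =>
                if ¬ PySem.Dict.contains d p.2 then PySem.Dict.insert d p.2 p.1 else d)
              PySem.Dict.empty) x 0).toNat x)
        (List.replicate A.length 0) A = _
    apply PySem.List.foldl_congr_mem'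
    intro x hx B
    have hp : (PySem.List.sorted A (fun x => x) false).Pairwise (· ≤ ·) := by
      simpa using PySem.List.sorted_pairwise A (fun x => x)
    have hxS : x ∈ PySem.List.sorted A (fun x => x) false :=
      (PySem.List.mem_sorted A (fun x => x) false x).mpr hx
    have hidx := findIdx_sorted (PySem.List.sorted A (fun x => x) false) hp x hxS
    have hget := rank_new (PySem.List.sorted A (fun x => x) false) x
      ((PySem.List.sorted A (fun x => x) false).countP (fun y => decide (x > y)))
      0 PySem.Dict.empty (PySem.Dict.contains_empty x) hidx
    have hgd : PySem.Dict.getD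
        ((PySem.List.enumerate (PySem.List.sorted A (fun x => x) false) 0).foldl
          (fun (d : PySem.Dict Int Int) (p : Int × Int) =>
            if ¬ PySem.Dict.contains d p.2 then PySem.Dict.insert d p.2 p.1 else d)
          PySem.Dict.empty) x 0
        = (0 : Int) + ((PySem.List.sorted A (fun x => x) false).countP (fun y => decide (x > y)) : Int) := by
      show (PySem.Dict.get? _ _).getD 0 = _
      rw [hget]
      rfl
    rw [hgd]
    have hperm : (PySem.List.sorted A (fun x => x) false).countP (fun y => decide (x > y))
        = A.countP (fun y => decide (x > y)) :=
      (PySem.List.sorted_perm A (fun x => x) false).countP_eq _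
    simp [hperm]
  rw [hA, hB]
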